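-- pv_equiv track=rewrite | github.com/GuillaumeJouetp/Compression_de_texte | huffman_VF.py | TableDeFrequence
-- ===== SOURCE A (Python) =====
-- def TableDeFrequence (texte):
--     """
--  Construction d'une table de fréquences
--     @ Entrée: un texte
--     @ type: string
--     @ Sortie: un dictionnaire qui pour chaque caractère présent dans le texte lui associe sa fréquence
--     @ type: dict
--     """
--
--     table={}                                  # crée un dictionnaire vide
--     for c in texte:                           # pour chaque caractère dans le texte
--         if c in table:                        # si le caractère est déjà dans le texte
--             table[c]=table[c]+1               # la valeur de la clef [nom du caractère] est incrémanté de 1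
--         else:
--             table[c]=1                        # sinon crée la clef [nom du caractère] et l'assimile a la valeur = 1
--     return table                              # cette fonction crée une clef pour chaque caractère different
-- ===== SOURCE B (Python) =====
-- def TableDeFrequence(texte):
--     return {c: texte.count(c) for c in dict.fromkeys(texte)}
-- ===== Notes on version B (the rewrite author's own statement) =====
-- stated objective: idiomatic
-- what changed: B replaces A's single-pass incremental counting loop by a dict comprehension over the distinct characters (dict.fromkeys order) with a full rescan per character via str.count.
import Mathlib
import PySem

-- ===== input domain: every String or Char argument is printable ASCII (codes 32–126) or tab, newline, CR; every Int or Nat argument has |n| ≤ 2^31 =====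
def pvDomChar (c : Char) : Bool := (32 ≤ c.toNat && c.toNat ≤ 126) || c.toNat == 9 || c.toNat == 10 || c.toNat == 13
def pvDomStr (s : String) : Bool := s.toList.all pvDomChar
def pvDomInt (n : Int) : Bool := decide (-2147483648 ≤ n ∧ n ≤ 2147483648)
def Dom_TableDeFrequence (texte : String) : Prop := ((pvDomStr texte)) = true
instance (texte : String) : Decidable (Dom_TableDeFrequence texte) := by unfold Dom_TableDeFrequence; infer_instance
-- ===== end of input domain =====

-- B: dict comprehension over distinct characters with a per-character rescan (str.count), instead of A's incremental one-pass table; same return value.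
-- ===== PORT A =====
-- A: table={}; for c in texte: if c in table: table[c]+=1 else: table[c]=1; return table
def TableDeFrequence (texte : String) : List (String × Int) :=
  (texte.toList.foldl
    (fun (table : PySem.Dict String Int) c =>
      if table.contains (String.ofList [c]) then
        table.insert (String.ofList [c]) (table.getD (String.ofList [c]) 0 + 1)
      else table.insert (String.ofList [c]) 1)
    PySem.Dict.empty).items

-- ===== PORT B =====
-- B: {c: texte.count(c) for c in dict.fromkeys(texte)}; a Python character is a 1-char
-- string, so texte.count(c) for a single character is exactly the character count.
def TableDeFrequence_alt (texte : String) : List (String × Int) :=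
  (PySem.List.dedup (texte.toList.map (fun c => String.ofList [c]))).map
    (fun k => (k, ((texte.toList.map (fun c => String.ofList [c])).count k : Int)))

-- ===== PRECONDITION & SPEC =====
def Spec_TableDeFrequence (texte : String) (out : List (String × Int)) : Prop := out = TableDeFrequence_alt texte
instance (texte : String) (out : List (String × Int)) : Decidable (Spec_TableDeFrequence texte out) := by unfold Spec_TableDeFrequence; infer_instance

-- ===== CLAIM (what is proved, stated in full; the proofs are below) =====
def Claim_equal_TableDeFrequence : Prop := ∀ (texte : String), Dom_TableDeFrequence texte → Spec_TableDeFrequence texte (TableDeFrequence texte)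

-- ===== LEMMAS AND PROOFS =====

lemma tdf_branch_eq (l : List String) :
    l.foldl
      (fun (d : PySem.Dict String Int) k =>
        if d.contains k then d.insert k (d.getD k 0 + 1) else d.insert k 1) PySem.Dict.empty
    = l.foldl (fun (d : PySem.Dict String Int) k => d.insert k (d.getD k 0 + 1))
        PySem.Dict.empty := by
  apply PySem.List.foldl_congr_mem
  intro d k _
  by_cases h : d.contains k
  · simp [h]
  · have h0 : d.getD k 0 = 0 := PySem.Dict.getD_of_not_contains d 0 (by simpa using h)
    simp [h, h0]

-- ===== VERDICT (by name: the statement is the Claim_ definition above) =====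
theorem TableDeFrequence_spec : Claim_equal_TableDeFrequence := by
  intro texte _
  unfold Spec_TableDeFrequence TableDeFrequence TableDeFrequence_alt
  rw [← List.foldl_map (f := fun c => String.ofList [c])
        (g := fun (table : PySem.Dict String Int) k =>
          if table.contains k then table.insert k (table.getD k 0 + 1)
          else table.insert k 1),
    tdf_branch_eq,
    PySem.Dict.foldl_insert_getD_add_one_eq_counter, PySem.Dict.items_counter]
  simp [PySem.List.dedup_eq_ofList]
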